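-- pv_equiv track=rewrite | github.com/Mamoutou7/healthrag | src/nlp/entity_extract.py | _chunk_entities_by_distance
-- ===== SOURCE A (Python) =====
-- from typing import List, Dict, Optional
--
-- def _chunk_entities_by_distance(
--         entities: List[Dict],
--         max_char_gap: int = 50,
--         max_chunk_size: int = 5,
-- ) -> Dict[str, List[Dict]]:
--     """
--     Group entities into chunks based on proximity and size.
--
--     Args:
--         entities (List[Dict]): List of entity dicts.
--         max_char_gap (int): Maximum character distance to group entities together.
--         max_chunk_size (int): Maximum number of entities per chunk.
--
--     Returns:
--         Dict[str, List[Dict]]: Mapping of chunk_id to entity list.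
--     """
--     if not entities:
--         return {}
--
--     chunks = []
--     current_chunk = [entities[0]]
--
--     for prev, curr in zip(entities, entities[1:]):
--         char_gap = curr["start"] - prev["end"]
--         # Start new chunk if gap too large or max size reached
--         if char_gap > max_char_gap or len(current_chunk) >= max_chunk_size:
--             chunks.append(current_chunk)
--             current_chunk = [curr]
--         else:
--             current_chunk.append(curr)
--
--     chunks.append(current_chunk)
--     return {f"chunk{i + 1}": chunk for i, chunk in enumerate(chunks)}
-- ===== SOURCE B (Python) =====
-- def _chunk_entities_by_distance(entities, max_char_gap=50, max_chunk_size=5):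
--     if not entities:
--         return {}
--     n = len(entities)
--     # Pass 1: indices where a new run must start (gap too large), as break positions.
--     breaks = [0] + [i for i in range(1, n)
--                     if entities[i]["start"] - entities[i - 1]["end"] > max_char_gap] + [n]
--     # Pass 2: slice each run entities[a:b] into consecutive groups of max(1, max_chunk_size).
--     m = max(1, max_chunk_size)
--     chunks = []
--     for a, b in zip(breaks, breaks[1:]):
--         run = entities[a:b]
--         for i in range(0, len(run), m):
--             chunks.append(run[i:i + m])
--     return {f"chunk{i + 1}": chunk for i, chunk in enumerate(chunks)}
-- ===== Notes on version B (the rewrite author's own statement) =====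
-- stated objective: alternative
-- what changed: A's single loop that interleaves the gap test with a running chunk-size counter is replaced by an index-based two-pass method: collect break positions where the gap exceeds max_char_gap, slice the entity list between consecutive breaks into runs, then cut each run into groups of max(1, max_chunk_size).
import Mathlib
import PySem

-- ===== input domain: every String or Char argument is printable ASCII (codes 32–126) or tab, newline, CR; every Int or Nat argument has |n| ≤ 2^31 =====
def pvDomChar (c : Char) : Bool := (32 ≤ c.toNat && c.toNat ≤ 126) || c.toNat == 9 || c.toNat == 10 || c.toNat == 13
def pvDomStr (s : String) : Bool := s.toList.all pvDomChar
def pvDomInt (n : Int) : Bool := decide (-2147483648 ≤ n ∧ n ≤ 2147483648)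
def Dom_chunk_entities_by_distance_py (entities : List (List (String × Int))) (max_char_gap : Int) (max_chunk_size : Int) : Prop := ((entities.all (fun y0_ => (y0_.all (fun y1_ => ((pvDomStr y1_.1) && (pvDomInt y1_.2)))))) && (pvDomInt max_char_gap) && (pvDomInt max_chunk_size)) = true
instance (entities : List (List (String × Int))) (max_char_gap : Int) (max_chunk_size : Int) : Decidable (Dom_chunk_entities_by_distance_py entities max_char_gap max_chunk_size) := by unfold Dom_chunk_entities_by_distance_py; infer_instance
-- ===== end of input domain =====

-- B replaces A's single stateful loop (gap test interleaved with a running size counter) by an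
-- index-based two-pass method: collect the break positions where the gap is too large, slice the
-- entity list between consecutive breaks into runs, and cut each run into groups of
-- max(1, max_chunk_size); an alternative decomposition of the same cost.

-- d["key"]: first the Python dict view of the assoc list, then the lookup; `.getD 0` is
-- unreachable under Pre_ (Python raises KeyError exactly where get? is none).
def pvVal (d : List (String × Int)) (k : String) : Int :=
  ((PySem.Dict.ofList d).get? k).getD 0

-- ===== PORT A =====
-- the dict comprehension {f"chunk{i+1}": chunk for i, chunk in enumerate(chunks)}
def pvLabel (chunks : List (List (List (String × Int)))) : List (String × List (List (String × Int))) :=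
  (PySem.List.enumerate chunks).map (fun ic => ("chunk" ++ PySem.Int.toStr (ic.1 + 1), ic.2))

-- the `for prev, curr in zip(entities, entities[1:])` loop, carrying prev and the state (chunks, current_chunk)
def chunkA_loop (g m : Int) : List (String × Int) → List (List (String × Int)) →
    List (List (List (String × Int))) → List (List (String × Int)) → List (List (List (String × Int)))
  | _prev, [], chunks, cur => chunks ++ [cur]
  | prev, c :: rest, chunks, cur =>
    if pvVal c "start" - pvVal prev "end" > g ∨ (cur.length : Int) ≥ m then
      chunkA_loop g m c rest (chunks ++ [cur]) [c]
    else
      chunkA_loop g m c rest chunks (cur ++ [c])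

def chunk_entities_by_distance_py (entities : List (List (String × Int))) (max_char_gap : Int) (max_chunk_size : Int) : List (String × List (List (String × Int))) :=
  match entities with
  | [] => []
  | e :: rest => pvLabel (chunkA_loop max_char_gap max_chunk_size e rest [] [e])

-- ===== PORT B =====
-- entities[i]["key"]: positional lookup, then the dict lookup; both defaults unreachable under Pre_
-- (indices come from range(1, n), and Python raises KeyError exactly where get? is none).
def bVal (xs : List (List (String × Int))) (i : Int) (key : String) : Int :=
  ((PySem.Dict.ofList ((PySem.List.pyGet? xs i).getD [])).get? key).getD 0

def chunk_entities_by_distance_py_alt (entities : List (List (String × Int))) (max_char_gap : Int) (max_chunk_size : Int) : List (String × List (List (String × Int))) :=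
  if entities.isEmpty then []
  else
    let n : Int := entities.length
    -- breaks = [0] + [i for i in range(1, n) if entities[i]["start"] - entities[i-1]["end"] > gap] + [n]
    let breaks : List Int :=
      0 :: (((PySem.List.pyRange 1 n 1).filter
              (fun i => decide (bVal entities i "start" - bVal entities (i - 1) "end" > max_char_gap))) ++ [n])
    let mEff : Int := max 1 max_chunk_size
    -- for a, b in zip(breaks, breaks[1:]): run = entities[a:b]; for i in range(0, len(run), m): run[i:i+m]
    let chunks := (breaks.zip breaks.tail).flatMap (fun ab =>
      let run := PySem.List.slice entities (some ab.1) (some ab.2)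
      (PySem.List.pyRange 0 (run.length : Int) mEff).map
        (fun i => PySem.List.slice run (some i) (some (i + mEff))))
    chunks.zipIdx.map (fun ci => ("chunk" ++ PySem.Int.toStr ((ci.2 : Int) + 1), ci.1))

-- ===== PRECONDITION & SPEC =====
-- Pre_ excludes exactly the inputs where Python raises KeyError: some adjacent pair lacks "end" (in prev) or "start" (in curr).
def Pre_chunk_entities_by_distance_py (entities : List (List (String × Int))) (max_char_gap : Int) (max_chunk_size : Int) : Prop :=
  ∀ p ∈ entities.zip entities.tail,
    ((PySem.Dict.ofList p.1).get? "end").isSome ∧ ((PySem.Dict.ofList p.2).get? "start").isSome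
instance (entities : List (List (String × Int))) (max_char_gap : Int) (max_chunk_size : Int) : Decidable (Pre_chunk_entities_by_distance_py entities max_char_gap max_chunk_size) := by unfold Pre_chunk_entities_by_distance_py; infer_instance

def pvWitness_chunk_entities_by_distance_py : (List (List (String × Int))) × Int × Int :=
  ([[("start", 0), ("end", 3)], [("start", 10), ("end", 12)], [("start", 90), ("end", 95)]], 50, 2)

def Spec_chunk_entities_by_distance_py (entities : List (List (String × Int))) (max_char_gap : Int) (max_chunk_size : Int) (out : List (String × List (List (String × Int)))) : Prop := out = chunk_entities_by_distance_py_alt entities max_char_gap max_chunk_size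
instance (entities : List (List (String × Int))) (max_char_gap : Int) (max_chunk_size : Int) (out : List (String × List (List (String × Int)))) : Decidable (Spec_chunk_entities_by_distance_py entities max_char_gap max_chunk_size out) := by unfold Spec_chunk_entities_by_distance_py; infer_instance

-- ===== CLAIM (what is proved, stated in full; the proofs are below) =====
def Claim_equal_chunk_entities_by_distance_py : Prop := ∀ (entities : List (List (String × Int))) (max_char_gap : Int) (max_chunk_size : Int), Dom_chunk_entities_by_distance_py entities max_char_gap max_chunk_size → Pre_chunk_entities_by_distance_py entities max_char_gap max_chunk_size → Spec_chunk_entities_by_distance_py entities max_char_gap max_chunk_size (chunk_entities_by_distance_py entities max_char_gap max_chunk_size)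

-- ===== LEMMAS AND PROOFS =====

-- proof-side bridge 1: A's runs, written as an accumulator loop matching A's shape
def chunkB_runs (g : Int) : List (String × Int) → List (List (String × Int)) →
    List (List (List (String × Int))) → List (List (String × Int)) → List (List (List (String × Int)))
  | _prev, [], runs, run => runs ++ [run]
  | prev, c :: rest, runs, run =>
    if pvVal c "start" - pvVal prev "end" > g then
      chunkB_runs g c rest (runs ++ [run]) [c]
    else
      chunkB_runs g c rest runs (run ++ [c])

-- proof-side bridge 2: slicing a run into groups of k + 1, structurally
def chunkB_slice (k : Nat) : List (List (String × Int)) → List (List (List (String × Int)))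
  | [] => []
  | x :: xs => (x :: xs.take k) :: chunkB_slice k (xs.drop k)
  termination_by xs => xs.length
  decreasing_by simp [List.length_drop]

-- proof-side bridge 3: the runs of a nonempty suffix, built back-to-front
def runsC (g : Int) : List (List (String × Int)) → List (List (List (String × Int)))
  | [] => []
  | [x] => [[x]]
  | x :: y :: t =>
    if pvVal y "start" - pvVal x "end" > g then [x] :: runsC g (y :: t)
    else ((x :: (runsC g (y :: t)).headI) :: (runsC g (y :: t)).tail)

def consHead (r' : List (List (String × Int))) : List (List (List (String × Int))) → List (List (List (String × Int)))
  | [] => [r']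
  | h :: t => (r' ++ h) :: t

-- proof-side bridge 4: the slices of entities between consecutive break positions
def chainSl (entities : List (List (String × Int))) : Int → List Int → List (List (List (String × Int)))
  | _, [] => []
  | a, b :: bs => PySem.List.slice entities (some a) (some b) :: chainSl entities b bs

@[simp] lemma slice_nil (k : Nat) : chunkB_slice k [] = [] := by rw [chunkB_slice]

@[simp] lemma slice_cons (k : Nat) (x : List (String × Int)) (xs : List (List (String × Int))) :
    chunkB_slice k (x :: xs) = (x :: xs.take k) :: chunkB_slice k (xs.drop k) := by
  rw [chunkB_slice]

-- appending one element to a run extends the last slice, or starts a new slice if it is full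
lemma slice_append (k : Nat) (xs : List (List (String × Int))) (c : List (String × Int))
    (done : List (List (List (String × Int)))) (cur : List (List (String × Int)))
    (h : chunkB_slice k xs = done ++ [cur]) :
    chunkB_slice k (xs ++ [c]) =
      if cur.length = k + 1 then done ++ [cur, [c]] else done ++ [cur ++ [c]] := by
  induction xs using chunkB_slice.induct (k := k) generalizing done cur with
  | case1 => simp at h
  | case2 x t ih =>
    rw [slice_cons] at h
    rcases Nat.lt_or_ge t.length k with hklt | hkge
    · rw [List.drop_eq_nil_of_le (by omega), slice_nil] at h
      obtain ⟨hdone, hcur⟩ : done = [] ∧ cur = x :: t.take k := by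
        cases done with
        | nil => exact ⟨rfl, by simpa using h.symm⟩
        | cons d ds => exact absurd (List.cons_eq_cons.mp h).2.symm (by simp)
      subst hdone hcur
      have ht : t.take k = t := List.take_of_length_le (by omega)
      rw [if_neg (by rw [ht]; simp only [List.length_cons]; omega)]
      have h1 : (t ++ [c]).take k = t ++ [c] := List.take_of_length_le (by simp; omega)
      have h2 : (t ++ [c]).drop k = [] := List.drop_eq_nil_of_le (by simp; omega)
      rw [ht, List.cons_append, slice_cons, h1, h2, slice_nil]
      simp
    · have htk : (t ++ [c]).take k = t.take k := List.take_append_of_le_length hkge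
      have hdk : (t ++ [c]).drop k = t.drop k ++ [c] := List.drop_append_of_le_length hkge
      rcases Nat.lt_or_ge k t.length with hlt | hge
      · have hnil : chunkB_slice k (t.drop k) ≠ [] := by
          obtain ⟨y, u, hyu⟩ := List.exists_cons_of_ne_nil
            (show t.drop k ≠ [] by rw [Ne, List.drop_eq_nil_iff]; omega)
          rw [hyu, slice_cons]; simp
        cases done with
        | nil => exact absurd (List.cons_eq_cons.mp h).2 hnil
        | cons d ds =>
          obtain ⟨hd, hrest⟩ := List.cons_eq_cons.mp h
          have ih' := ih ds cur hrest
          rw [List.cons_append, slice_cons, htk, hdk, ih']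
          split <;> simp [hd]
      · rw [List.drop_eq_nil_of_le (by omega), slice_nil] at h
        obtain ⟨hdone, hcur⟩ : done = [] ∧ cur = x :: t.take k := by
          cases done with
          | nil => exact ⟨rfl, by simpa using h.symm⟩
          | cons d ds => exact absurd (List.cons_eq_cons.mp h).2.symm (by simp)
        subst hdone hcur
        have ht : t.take k = t := List.take_of_length_le (by omega)
        rw [if_pos (by rw [ht]; simp only [List.length_cons]; omega)]
        rw [List.cons_append, slice_cons, htk, hdk, List.drop_eq_nil_of_le (by omega)]
        simp [ht]

-- the main invariant on A's side: A's loop state (chunks, cur) is (runs, run) with run pre-sliced,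
-- cur being the (nonempty, not over-full) last slice of the current run
lemma loop_eq (g m : Int) (k : Nat) (hk : (k : Int) + 1 = max 1 m) :
    ∀ (rest : List (List (String × Int))) (prev : List (String × Int))
      (runs : List (List (List (String × Int)))) (run : List (List (String × Int)))
      (chunks done : List (List (List (String × Int)))) (cur : List (List (String × Int))),
      cur ≠ [] → cur.length ≤ k + 1 →
      chunkB_slice k run = done ++ [cur] →
      chunks = runs.flatMap (chunkB_slice k) ++ done →
      chunkA_loop g m prev rest chunks cur =
        (chunkB_runs g prev rest runs run).flatMap (chunkB_slice k) := by
  intro rest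
  induction rest with
  | nil =>
    intro prev runs run chunks done cur hne hlen hslice hchunks
    simp [chunkA_loop, chunkB_runs, hchunks, hslice]
  | cons c rest ih =>
    intro prev runs run chunks done cur hne hlen hslice hchunks
    have hone : 1 ≤ cur.length := List.length_pos_of_ne_nil hne
    simp only [chunkA_loop, chunkB_runs]
    by_cases hgap : pvVal c "start" - pvVal prev "end" > g
    · rw [if_pos (Or.inl hgap), if_pos hgap]
      exact ih c (runs ++ [run]) [c] _ [] [c] (by simp) (by simp) (by simp)
        (by simp [hchunks, hslice])
    · rw [if_neg hgap]
      by_cases hsz : (cur.length : Int) ≥ m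
      · have hfull : cur.length = k + 1 := by
          have h2 : (k : Int) + 1 ≤ (cur.length : Int) := by
            rw [hk]; exact max_le (by exact_mod_cast hone) hsz
          omega
        rw [if_pos (Or.inr hsz)]
        refine ih c runs (run ++ [c]) _ (done ++ [cur]) [c] (by simp) (by simp) ?_ ?_
        · rw [slice_append k run c done cur hslice, if_pos hfull]; simp
        · simp [hchunks]
      · have hlt : cur.length < k + 1 := by
          have h1 : (cur.length : Int) < max 1 m :=
            lt_of_lt_of_le (lt_of_not_ge hsz) (le_max_right _ _)
          omega
        rw [if_neg (by rw [not_or]; exact ⟨hgap, hsz⟩)]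
        refine ih c runs (run ++ [c]) _ done (cur ++ [c]) (by simp) (by simp; omega) ?_ hchunks
        rw [slice_append k run c done cur hslice, if_neg (by omega)]

-- A's accumulator loop over runs equals the back-to-front runsC (run = r' ++ [prev] so far)
lemma runsC_shape (g : Int) (x : List (String × Int)) (l : List (List (String × Int))) :
    ∃ h t, runsC g (x :: l) = h :: t := by
  cases l with
  | nil => exact ⟨[x], [], rfl⟩
  | cons y t =>
    rw [runsC]
    split
    · exact ⟨_, _, rfl⟩
    · exact ⟨_, _, rfl⟩

lemma runs_eq_runsC (g : Int) :
    ∀ (rest : List (List (String × Int))) (prev : List (String × Int))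
      (runs : List (List (List (String × Int)))) (r' : List (List (String × Int))),
      chunkB_runs g prev rest runs (r' ++ [prev]) = runs ++ consHead r' (runsC g (prev :: rest)) := by
  intro rest
  induction rest with
  | nil => intro prev runs r'; simp [chunkB_runs, runsC, consHead]
  | cons c rest ih =>
    intro prev runs r'
    obtain ⟨h, t, hht⟩ := runsC_shape g c rest
    rw [chunkB_runs, runsC, hht]
    by_cases hgap : pvVal c "start" - pvVal prev "end" > g
    · rw [if_pos hgap, if_pos hgap]
      have := ih c (runs ++ [r' ++ [prev]]) []
      simp only [List.nil_append] at this
      rw [this, hht]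
      simp [consHead]
    · rw [if_neg hgap, if_neg hgap]
      have h2 := ih c runs (r' ++ [prev])
      rw [hht] at h2
      rw [h2]
      simp [consHead]

-- pyRange with a positive step: nil and cons unfoldings
lemma pyRange_pos_nil (a b s : Int) (hs : 0 < s) (hab : b ≤ a) :
    PySem.List.pyRange a b s = [] := by
  rw [PySem.List.pyRange_of_pos _ _ hs, if_neg (by omega)]
  simp

lemma pyRange_pos_cons (a b s : Int) (hs : 0 < s) (hab : a < b) :
    PySem.List.pyRange a b s = a :: PySem.List.pyRange (a + s) b s := by
  rw [PySem.List.pyRange_of_pos _ _ hs, PySem.List.pyRange_of_pos _ _ hs, if_pos hab]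
  have key : b - a + s - 1 = (b - a - 1) + 1 * s := by ring
  have hdiv : (b - a + s - 1) / s = (b - a - 1) / s + 1 := by
    rw [key, Int.add_mul_ediv_right _ _ (ne_of_gt hs)]
  have h0 : 0 ≤ (b - a - 1) / s := Int.ediv_nonneg (by omega) (le_of_lt hs)
  have hN : ((b - a + s - 1) / s).toNat = ((b - a - 1) / s).toNat + 1 := by
    rw [hdiv]; omega
  rw [hN, List.range_succ_eq_map, List.map_cons, List.map_map]
  have harg : b - (a + s) + s - 1 = b - a - 1 := by ring
  by_cases hlt : a + s < b
  · rw [if_pos hlt, harg]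
    congr 1
    · simp
    · apply List.map_congr_left; intro k _; simp [Nat.succ_eq_add_one]; ring
  · rw [if_neg hlt]
    have : (b - a - 1) / s = 0 := Int.ediv_eq_zero_of_lt (by omega) (by omega)
    rw [this]
    simp

-- stepping through a suffix of u in strides of k+1 reproduces chunkB_slice of that suffix
lemma map_slice_groups (k : Nat) (u : List (List (String × Int))) :
    ∀ (w : List (List (String × Int))) (a : Nat), w = u.drop a →
      (PySem.List.pyRange (a : Int) (u.length : Int) ((k : Int) + 1)).map
          (fun i => PySem.List.slice u (some i) (some (i + ((k : Int) + 1)))) = chunkB_slice k w := by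
  intro w
  induction w using chunkB_slice.induct (k := k) with
  | case1 =>
    intro a hw
    have hlen : u.length ≤ a := by
      by_contra hcon
      have : u.drop a ≠ [] := by rw [Ne, List.drop_eq_nil_iff]; omega
      exact this hw.symm
    rw [pyRange_pos_nil _ _ _ (by omega) (by exact_mod_cast hlen)]
    simp
  | case2 x xs ih =>
    intro a hw
    have halt : a < u.length := by
      by_contra hcon
      rw [List.drop_eq_nil_of_le (by omega)] at hw
      simp at hw
    rw [pyRange_pos_cons _ _ _ (by omega) (by exact_mod_cast halt), List.map_cons]
    have hcast : ((a : Int) + ((k : Int) + 1)) = ((a + (k + 1) : Nat) : Int) := by push_cast; ring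
    have hhead : PySem.List.slice u (some (a : Int)) (some ((a : Int) + ((k : Int) + 1))) = x :: xs.take k := by
      have := PySem.List.slice_natCast_add u a (k + 1)
      rw [show ((a : Int) + ((k + 1 : Nat) : Int)) = (a : Int) + ((k : Int) + 1) by push_cast; ring] at this
      rw [this, ← hw]
      simp
    have htail : xs.drop k = u.drop (a + (k + 1)) := by
      rw [← List.drop_drop, ← hw]
      simp
    rw [hhead, slice_cons, hcast, ih _ htail]

-- zipping breaks with their tail slices consecutive segments: the chainSl view
lemma zip_chain (entities : List (List (String × Int))) :
    ∀ (l : List Int) (a : Int),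
      (((a :: l).zip l).map (fun ab => PySem.List.slice entities (some ab.1) (some ab.2))) = chainSl entities a l := by
  intro l
  induction l with
  | nil => intro a; rfl
  | cons b bs ih => intro a; simp only [List.zip_cons_cons, List.map_cons, chainSl]; rw [ih]

-- positional lookup at index j is the head of the suffix at j
lemma bVal_eq_pvVal (entities : List (List (String × Int))) (j : Nat)
    (x : List (String × Int)) (t : List (List (String × Int)))
    (hj : entities.drop j = x :: t) (key : String) :
    bVal entities (j : Int) key = pvVal x key := by
  have hx : entities[j]? = some x := by
    have := @List.getElem?_drop _ entities j 0
    rw [hj] at this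
    simpa using this.symm
  rw [bVal, PySem.List.pyGet?_natCast, hx, pvVal]
  rfl

-- the slices between consecutive breaks of the suffix at j are the runs of that suffix
lemma chain_eq_runsC (g : Int) (entities : List (List (String × Int))) :
    ∀ (t : List (List (String × Int))) (x : List (String × Int)) (j : Nat),
      entities.drop j = x :: t →
      chainSl entities (j : Int)
        (((PySem.List.pyRange ((j : Int) + 1) (entities.length : Int) 1).filter
            (fun i => decide (bVal entities i "start" - bVal entities (i - 1) "end" > g))) ++ [(entities.length : Int)]) =
        runsC g (x :: t) := by
  intro t
  induction t with
  | nil =>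
    intro x j hj
    have hlen : entities.length = j + 1 := by
      have := congrArg List.length hj
      simp at this
      omega
    rw [PySem.List.pyRange_one_eq_nil (by omega)]
    · simp only [List.filter_nil, List.nil_append, chainSl, runsC]
      congr 1
      rw [PySem.List.slice_toNat entities (by positivity) (by positivity)]
      rw [Int.toNat_natCast, Int.toNat_natCast, hlen, hj]
      simp
  | cons y t' ih =>
    intro x j hj
    have hdropsucc : entities.drop (j + 1) = y :: t' := by
      rw [← List.drop_drop, hj]
      rfl
    have hjlt : (j : Int) + 1 < (entities.length : Int) := by
      have := congrArg List.length hj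
      simp at this
      omega
    have h1' : bVal entities ((j : Int) + 1) "start" = pvVal y "start" := by
      rw [show ((j : Int) + 1) = ((j + 1 : Nat) : Int) by push_cast; ring]
      exact bVal_eq_pvVal entities (j + 1) y t' hdropsucc "start"
    have h2' : bVal entities ((j : Int)) "end" = pvVal x "end" :=
      bVal_eq_pvVal entities j x (y :: t') hj "end"
    have hcond : (decide (bVal entities ((j : Int) + 1) "start" - bVal entities ((j : Int) + 1 - 1) "end" > g))
        = (decide (pvVal y "start" - pvVal x "end" > g)) := by
      rw [show ((j : Int) + 1 - 1) = (j : Int) by ring, h1', h2']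
    rw [PySem.List.pyRange_one_cons hjlt, List.filter_cons, hcond]
    have ihe := ih y (j + 1) hdropsucc
    rw [show (((j : Nat) + 1 : Nat) : Int) = (j : Int) + 1 by push_cast; ring] at ihe
    by_cases hgap : pvVal y "start" - pvVal x "end" > g
    · rw [if_pos (by simpa using hgap)]
      simp only [List.cons_append, chainSl]
      rw [ihe, runsC, if_pos hgap]
      congr 1
      rw [show ((j : Int) + 1) = ((j + 1 : Nat) : Int) by push_cast; ring,
        PySem.List.slice_natCast entities j (j + 1)]
      rw [hj]
      simp
    · rw [if_neg (by simpa using hgap)]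
      -- the first break after j is the same as after j+1; prepend x to the first run
      rw [runsC, if_neg hgap]
      set L := ((PySem.List.pyRange ((j : Int) + 1 + 1) (entities.length : Int) 1).filter
          (fun i => decide (bVal entities i "start" - bVal entities (i - 1) "end" > g))) ++ [(entities.length : Int)] with hL
      obtain ⟨b, bs, hbbs⟩ : ∃ b bs, L = b :: bs := by
        cases hLc : L with
        | nil => simp [hL] at hLc
        | cons b bs => exact ⟨b, bs, rfl⟩
      have hbge : (j : Int) + 1 ≤ b ∧ b ≤ (entities.length : Int) := by
        have hbmem : b ∈ L := by rw [hbbs]; exact List.mem_cons_self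
        rw [hL] at hbmem
        rcases List.mem_append.mp hbmem with hmem | hmem
        · have := List.mem_of_mem_filter hmem
          have := (PySem.List.mem_pyRange_one).mp this
          omega
        · simp at hmem
          omega
      rw [hbbs] at ihe
      rw [hbbs]
      have hslice : PySem.List.slice entities (some (j : Int)) (some b)
          = x :: PySem.List.slice entities (some ((j : Int) + 1)) (some b) := by
        rw [PySem.List.slice_toNat entities (by positivity) (by omega),
          PySem.List.slice_toNat entities (by positivity) (by omega)]
        have h1 : ((j : Int)).toNat = j := Int.toNat_natCast j
        have h2 : ((j : Int) + 1).toNat = j + 1 := by omega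
        rw [h1, h2, hj, hdropsucc]
        rw [show b.toNat - j = (b.toNat - (j + 1)) + 1 by omega, List.take_succ_cons]
      rw [chainSl, hslice]
      rw [chainSl] at ihe
      rw [← ihe]
      rfl

-- the two labelings (enumerate-based and zipIdx-based) agree
lemma label_eq (chunks : List (List (List (String × Int)))) :
    chunks.zipIdx.map (fun ci => ("chunk" ++ PySem.Int.toStr ((ci.2 : Int) + 1), ci.1)) = pvLabel chunks := by
  rw [pvLabel, PySem.List.enumerate_eq_zipIdx_map, List.map_map]
  simp

-- ===== VERDICT (by name: the statement is the Claim_ definition above) =====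
theorem chunk_entities_by_distance_py_spec : Claim_equal_chunk_entities_by_distance_py := by
  intro entities g m _ _
  unfold Spec_chunk_entities_by_distance_py
  cases entities with
  | nil => rfl
  | cons e rest =>
    have hm : (1 : Int) ≤ max 1 m := le_max_left _ _
    have hk : (((max 1 m).toNat - 1 : Nat) : Int) + 1 = max 1 m := by omega
    set k : Nat := (max 1 m).toNat - 1 with hkdef
    obtain ⟨h, t, hht⟩ := runsC_shape g e rest
    -- A's loop computes the runs, each pre-sliced into groups of k + 1
    have hA : chunk_entities_by_distance_py (e :: rest) g m
        = pvLabel ((runsC g (e :: rest)).flatMap (chunkB_slice k)) := by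
      simp only [chunk_entities_by_distance_py]
      rw [loop_eq g m k hk rest e [] [e] [] [] [e] (by simp) (by simp) (by simp) (by simp)]
      have hr := runs_eq_runsC g rest e [] []
      simp only [List.nil_append] at hr
      rw [hr, hht]
      simp [consHead]
    rw [hA]
    -- B's break positions, sliced and grouped, compute the same
    rw [chunk_entities_by_distance_py_alt]
    rw [if_neg (by simp)]
    simp only [List.tail_cons]
    have hfun : (fun (ab : Int × Int) =>
        (PySem.List.pyRange 0 (((PySem.List.slice (e :: rest) (some ab.1) (some ab.2)).length : Nat) : Int) (max 1 m)).map
          (fun i => PySem.List.slice (PySem.List.slice (e :: rest) (some ab.1) (some ab.2)) (some i) (some (i + max 1 m))))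
        = (fun ab : Int × Int => chunkB_slice k (PySem.List.slice (e :: rest) (some ab.1) (some ab.2))) := by
      funext ab
      rw [← hk]
      exact_mod_cast map_slice_groups k _ _ 0 (by simp)
    rw [hfun, ← List.flatMap_map (fun ab : Int × Int => PySem.List.slice (e :: rest) (some ab.1) (some ab.2)) (chunkB_slice k)]
    rw [zip_chain (e :: rest) ((PySem.List.pyRange 1 ((e :: rest).length : Int) 1).filter
        (fun i => decide (bVal (e :: rest) i "start" - bVal (e :: rest) (i - 1) "end" > g)) ++ [((e :: rest).length : Int)]) 0]
    have hc := chain_eq_runsC g (e :: rest) rest e 0 (by simp)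
    simp only [Nat.cast_zero, zero_add] at hc
    rw [hc, label_eq]
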